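-- pv_equiv track=rewrite | github.com/jleen/discjockey | discjockey/largo.py | bandcamp_prefix
-- ===== SOURCE A (Python) =====
-- DELIM = ' - '
--
-- def bandcamp_prefix(strings):
--     first = strings[0]
--     skip = 0
--     candidate = ''
--     found = ''
--     for _ in range(0, first.count(DELIM)):
--         skip = first.find(DELIM, skip) + len(DELIM)
--         candidate = first[0:skip]
--         for s in strings:
--             if s.endswith('.flac') and not s.startswith(candidate):
--                 # Me go too far.
--                 return found
--         found = candidate
--     return found
-- ===== SOURCE B (Python) =====
-- DELIM = ' - '
--
--
-- def _cpl(a, b):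
--     # length of the longest common prefix of a and b,
--     # by binary search on n |-> b.startswith(a[:n])
--     lo, hi = 0, min(len(a), len(b))
--     while lo < hi:
--         mid = (lo + hi + 1) // 2
--         if b.startswith(a[:mid]):
--             lo = mid
--         else:
--             hi = mid - 1
--     return lo
--
--
-- def bandcamp_prefix(strings):
--     first = strings[0]
--     limit = len(first)
--     for s in strings:
--         if s.endswith('.flac'):
--             limit = min(limit, _cpl(first, s))
--     best = 0
--     pos = first.find(DELIM)
--     while pos != -1 and pos + len(DELIM) <= limit:
--         best = pos + len(DELIM)
--         pos = first.find(DELIM, best)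
--     return first[:best]
-- ===== Notes on version B (the rewrite author's own statement) =====
-- stated objective: alternative
-- what changed: A re-tests every string against every successive delimiter-aligned candidate prefix; B computes the common-prefix limit over the .flac strings once (binary search per string on startswith) and then walks the non-overlapping ' - ' boundaries a single time, keeping the largest boundary within the limit.
import Mathlib
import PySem

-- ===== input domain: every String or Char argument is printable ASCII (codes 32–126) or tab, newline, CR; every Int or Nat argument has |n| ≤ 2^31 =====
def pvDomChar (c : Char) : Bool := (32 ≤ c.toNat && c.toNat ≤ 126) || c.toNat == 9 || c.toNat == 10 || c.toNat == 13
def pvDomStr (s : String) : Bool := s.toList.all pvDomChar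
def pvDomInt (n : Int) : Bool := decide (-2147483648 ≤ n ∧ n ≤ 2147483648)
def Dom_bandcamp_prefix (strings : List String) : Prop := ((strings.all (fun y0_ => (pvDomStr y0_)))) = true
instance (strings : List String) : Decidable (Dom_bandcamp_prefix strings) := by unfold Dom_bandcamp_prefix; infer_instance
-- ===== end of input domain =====

-- B replaces A's per-delimiter rescan of all strings by one common-prefix-limit computation
-- followed by a single walk over the delimiter boundaries (objective: alternative).


-- DELIM = ' - '
def pvDELIM : String := " - "

-- ===== PORT A =====
-- the 'for _ in range(0, first.count(DELIM))' loop of A, state (skip, candidate, found);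
-- the inner 'for s in strings: … return found' early-return loop is List.any
def pvALoop (strings : List String) (first : String) : Nat → Int → String → String → String
  | 0, _, _, found => found
  | n + 1, skip, _candidate, found =>
    let skip' := PySem.Str.findFrom first pvDELIM skip none + (PySem.Str.len pvDELIM)
    let candidate := PySem.Str.slice first (some 0) (some skip')
    if strings.any (fun s => PySem.Str.endswith s ".flac" && !(PySem.Str.startswith s candidate))
    then found
    else pvALoop strings first n skip' candidate candidate

def bandcamp_prefix (strings : List String) : String :=
  match PySem.List.pyGet? strings 0 with
  | none => ""   -- strings[0] raises IndexError; excluded by Pre_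
  | some first => pvALoop strings first (PySem.Str.count first pvDELIM) 0 "" ""

-- ===== PORT B =====
-- _cpl(a, b): binary search 'while lo < hi' on the monotone test b.startswith(a[:mid]);
-- the fuel only makes the loop total: hi - lo shrinks every iteration, so hi - lo + 1 is never exhausted
def pvCplSearch (a b : String) : Nat → Nat → Nat → Nat
  | 0, lo, _ => lo
  | fuel + 1, lo, hi =>
    if lo < hi then
      if PySem.Str.startswith b (PySem.Str.slice a none (some (((lo + hi + 1) / 2 : Nat) : Int)))
      then pvCplSearch a b fuel ((lo + hi + 1) / 2) hi
      else pvCplSearch a b fuel lo ((lo + hi + 1) / 2 - 1)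
    else lo

def pvCpl (a b : String) : Nat :=
  pvCplSearch a b (min a.toList.length b.toList.length + 1) 0 (min a.toList.length b.toList.length)

-- 'for s in strings: if s.endswith(".flac"): limit = min(limit, _cpl(first, s))'
def pvLimit (strings : List String) (first : String) : Nat :=
  strings.foldl
    (fun limit s => if PySem.Str.endswith s ".flac" then min limit (pvCpl first s) else limit)
    first.toList.length

-- 'while pos != -1 and pos + len(DELIM) <= limit: best = pos + 3; pos = first.find(DELIM, best)';
-- the fuel only makes the loop total: len(first)+1 iterations are never exhausted (best grows by 3 per step)
def pvBLoop (first : String) (limit : Nat) : Nat → Nat → Nat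
  | 0, best => best
  | fuel + 1, best =>
    let pos := PySem.Str.findFrom first pvDELIM (best : Int) none
    if pos ≠ -1 ∧ pos + 3 ≤ (limit : Int) then pvBLoop first limit fuel (pos + 3).toNat else best

def bandcamp_prefix_alt (strings : List String) : String :=
  match PySem.List.pyGet? strings 0 with
  | none => ""   -- strings[0] raises IndexError; excluded by Pre_
  | some first =>
    let limit := pvLimit strings first
    let best := pvBLoop first limit (first.toList.length + 1) 0
    PySem.Str.slice first none (some (best : Int))

-- ===== PRECONDITION & SPEC =====
-- Python A evaluates strings[0], an IndexError on the empty list; that is all Pre_ excludes.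
def Pre_bandcamp_prefix (strings : List String) : Prop := strings ≠ []
instance (strings : List String) : Decidable (Pre_bandcamp_prefix strings) := by unfold Pre_bandcamp_prefix; infer_instance

def pvWitness_bandcamp_prefix : List String := ["Album - 01 One.flac", "Album - 02 Two.flac"]

def Spec_bandcamp_prefix (strings : List String) (out : String) : Prop := out = bandcamp_prefix_alt strings
instance (strings : List String) (out : String) : Decidable (Spec_bandcamp_prefix strings out) := by unfold Spec_bandcamp_prefix; infer_instance

-- ===== CLAIM (what is proved, stated in full; the proofs are below) =====
def Claim_equal_bandcamp_prefix : Prop := ∀ (strings : List String), Dom_bandcamp_prefix strings → Pre_bandcamp_prefix strings → Spec_bandcamp_prefix strings (bandcamp_prefix strings)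

-- ===== LEMMAS AND PROOFS =====


def pvD : List Char := [' ', '-', ' ']

def pvCountR : List Char → Nat
  | [] => 0
  | c :: t => if pvD.isPrefixOf (c :: t) then pvCountR (t.drop 2) + 1 else pvCountR t
termination_by l => l.length
decreasing_by all_goals (simp [List.length_drop]; try omega)

lemma pvD_len : pvD.length = 3 := rfl

lemma pvCountGo (fuel : Nat) : ∀ (l : List Char) (acc : Nat), l.length ≤ fuel →
    PySem.Chars.count.go pvD fuel l acc = acc + pvCountR l := by
  induction fuel with
  | zero =>
    intro l acc h
    have : l = [] := List.eq_nil_of_length_eq_zero (by omega)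
    subst this
    rw [PySem.Chars.count.go]
    simp [pvCountR]
  | succ fuel ih =>
    intro l acc h
    cases l with
    | nil =>
      rw [PySem.Chars.count.go]
      · simp [pvCountR]
      · omega
    | cons c t =>
      rw [PySem.Chars.count.go]
      by_cases hp : pvD.isPrefixOf (c :: t)
      · rw [if_pos hp]
        have hlen : ((c :: t).drop pvD.length).length ≤ fuel := by
          rw [List.length_drop, pvD_len]; simp at h ⊢; omega
        rw [ih _ _ hlen]
        rw [pvCountR]
        rw [if_pos hp]
        have h2 : (c :: t).drop pvD.length = t.drop 2 := rfl
        rw [h2]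
        omega
      · rw [if_neg hp]
        have hlen : t.length ≤ fuel := by simp at h; omega
        rw [ih _ _ hlen, pvCountR, if_neg hp]

lemma pvCount_eq (s : List Char) : PySem.Chars.count s pvD = pvCountR s := by
  rw [PySem.Chars.count]
  have h : pvD.isEmpty = false := by decide
  rw [h]
  simp only [Bool.false_eq_true, if_false]
  rw [pvCountGo s.length s 0 le_rfl]
  omega

lemma pvFindGo_ge (l : List Char) : ∀ k : Nat, -1 ≤ PySem.Chars.find.go pvD l k := by
  induction l with
  | nil =>
    intro k
    rw [PySem.Chars.find.go]
    have h : pvD.isEmpty = false := by decide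
    rw [h]
    simp
  | cons c t ih =>
    intro k
    rw [PySem.Chars.find.go]
    split
    · omega
    · exact ih (k+1)

lemma pvFindGoShift (l : List Char) : ∀ (k : Nat),
    PySem.Chars.find.go pvD l k =
      if PySem.Chars.find.go pvD l 0 = -1 then -1 else PySem.Chars.find.go pvD l 0 + k := by
  induction l with
  | nil =>
    intro k
    rw [PySem.Chars.find.go, PySem.Chars.find.go]
    have h : pvD.isEmpty = false := by decide
    rw [h]
    simp
  | cons c t ih =>
    intro k
    rw [PySem.Chars.find.go]
    conv_rhs => rw [PySem.Chars.find.go]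
    by_cases hp : pvD.isPrefixOf (c :: t)
    · simp [hp]
    · simp only [hp, Bool.false_eq_true, if_false]
      rw [ih (k+1), ih 1]
      have h0 := pvFindGo_ge t 0
      split_ifs <;> push_cast <;> omega

lemma pvFind_go_eq (t : List Char) : PySem.Chars.find t pvD = PySem.Chars.find.go pvD t 0 := rfl

lemma pvCountR_step (s : List Char) :
    pvCountR s = if PySem.Chars.find s pvD = -1 then 0
                 else pvCountR (s.drop ((PySem.Chars.find s pvD).toNat + 3)) + 1 := by
  induction s with
  | nil =>
    rw [pvFind_go_eq, PySem.Chars.find.go]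
    have h : pvD.isEmpty = false := by decide
    rw [h]
    simp [pvCountR]
  | cons c t ih =>
    rw [pvFind_go_eq, PySem.Chars.find.go]
    by_cases hp : pvD.isPrefixOf (c :: t)
    · simp only [hp, if_true]
      push_cast
      rw [pvCountR, if_pos hp]
      rfl
    · simp only [hp, Bool.false_eq_true, if_false]
      rw [pvFindGoShift t 1]
      rw [pvCountR, if_neg hp]
      by_cases hg : PySem.Chars.find.go pvD t 0 = -1
      · rw [if_pos (by rw [if_pos hg])]
        rw [ih, pvFind_go_eq, if_pos hg]
      · have h0 : 0 ≤ PySem.Chars.find.go pvD t 0 := by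
          have := pvFindGo_ge t 0; omega
        rw [if_neg hg]
        have hne : ¬ (PySem.Chars.find.go pvD t 0 + ((1:Nat):Int) = -1) := by push_cast; omega
        rw [if_neg hne]
        rw [ih, pvFind_go_eq, if_neg hg]
        have htn : (PySem.Chars.find.go pvD t 0 + ((1:Nat):Int)).toNat = (PySem.Chars.find.go pvD t 0).toNat + 1 := by push_cast; omega
        rw [htn]
        rfl

lemma pvFind_fits (s : List Char) (h : PySem.Chars.find s pvD ≠ -1) :
    (PySem.Chars.find s pvD).toNat + 3 ≤ s.length := by
  have h0 : 0 ≤ PySem.Chars.find s pvD := by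
    have := PySem.Chars.neg_one_le_find s pvD; omega
  have hpre := (PySem.Chars.find_spec (s := s) (sub := pvD) h0).1
  have hl := hpre.length_le
  rw [List.length_drop, pvD_len] at hl
  omega


def pvCplR : List Char → List Char → Nat
  | x :: a, y :: b => if x = y then pvCplR a b + 1 else 0
  | _, _ => 0

lemma pvCplR_nil_right (a : List Char) : pvCplR a [] = 0 := by
  cases a <;> rfl

lemma pvCplR_cons_cons (x : Char) (a : List Char) (y : Char) (b : List Char) :
    pvCplR (x :: a) (y :: b) = if x = y then pvCplR a b + 1 else 0 := rfl

lemma pvPrefix_iff_cpl (a : List Char) : ∀ (b : List Char) (k : Nat), k ≤ a.length →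
    ((a.take k).isPrefixOf b = true ↔ k ≤ pvCplR a b) := by
  induction a with
  | nil =>
    intro b k hk
    simp at hk
    subst hk
    simp
  | cons x a ih =>
    intro b k hk
    cases k with
    | zero => simp
    | succ k =>
      cases b with
      | nil => simp [pvCplR_nil_right]
      | cons y b =>
        rw [List.take_succ_cons]
        rw [pvCplR_cons_cons]
        by_cases hxy : x = y
        · subst hxy
          simp only [List.isPrefixOf, BEq.rfl, Bool.true_and]
          rw [ih b k (by simpa using hk)]
          split_ifs with hT
          · omega
          · exact absurd trivial hT
        · simp [List.isPrefixOf, hxy, beq_iff_eq]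

lemma pvCplR_le (a : List Char) : ∀ b : List Char, pvCplR a b ≤ min a.length b.length := by
  induction a with
  | nil => intro b; simp [pvCplR]
  | cons x a ih =>
    intro b
    cases b with
    | nil => simp [pvCplR_nil_right]
    | cons y b =>
      rw [pvCplR_cons_cons]
      have := ih b
      simp only [List.length_cons]
      split <;> omega

lemma pvSliceTake (f : String) (k : Nat) :
    (PySem.Str.slice f none (some (k : Int))).toList = f.toList.take k := by
  simp [PySem.Str.slice, PySem.List.slice_to_natCast]

lemma pvStartswith_take (s f : String) (k : Nat) :
    PySem.Str.startswith s (PySem.Str.slice f none (some (k : Int))) = (f.toList.take k).isPrefixOf s.toList := by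
  rw [PySem.Str.startswith]
  rw [PySem.Chars.startswith]
  rw [pvSliceTake]

lemma pvCplSearch_eq (a b : String) : ∀ (fuel lo hi : Nat), hi ≤ a.toList.length →
    lo ≤ pvCplR a.toList b.toList → pvCplR a.toList b.toList ≤ hi → hi - lo < fuel →
    pvCplSearch a b fuel lo hi = pvCplR a.toList b.toList := by
  intro fuel
  induction fuel with
  | zero => intro lo hi _ _ _ hf; omega
  | succ fuel ih =>
    intro lo hi ha h1 h2 hf
    rw [pvCplSearch]
    by_cases h : lo < hi
    · rw [if_pos h]
      have hmid : lo < (lo + hi + 1) / 2 ∧ (lo + hi + 1) / 2 ≤ hi := by omega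
      rw [pvStartswith_take]
      by_cases hsw : (a.toList.take ((lo + hi + 1) / 2)).isPrefixOf b.toList = true
      · rw [if_pos hsw]
        have hc : (lo + hi + 1) / 2 ≤ pvCplR a.toList b.toList :=
          (pvPrefix_iff_cpl a.toList b.toList _ (by omega)).mp hsw
        exact ih _ _ ha hc h2 (by omega)
      · rw [if_neg hsw]
        have hc : pvCplR a.toList b.toList < (lo + hi + 1) / 2 := by
          by_contra hcon
          exact hsw ((pvPrefix_iff_cpl a.toList b.toList _ (by omega)).mpr (by omega))
        exact ih _ _ (by omega) h1 (by omega) (by omega)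
    · rw [if_neg h]
      omega

lemma pvCpl_eq (a b : String) : pvCpl a b = pvCplR a.toList b.toList := by
  have := pvCplR_le a.toList b.toList
  exact pvCplSearch_eq a b _ 0 _ (min_le_left _ _) (by omega) (by omega) (by omega)

lemma pvFoldl_le (f : String) (ss : List String) : ∀ (L0 : Nat),
    ss.foldl (fun limit s => if PySem.Str.endswith s ".flac" then min limit (pvCpl f s) else limit) L0 ≤ L0 := by
  induction ss with
  | nil => intro L0; simp
  | cons s t ih =>
    intro L0
    rw [List.foldl_cons]
    refine le_trans (ih _) ?_
    split <;> omega

lemma pvAnyIff (f : String) (k : Nat) (hk : k ≤ f.toList.length) (ss : List String) : ∀ (L0 : Nat), k ≤ L0 →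
    (ss.any (fun s => PySem.Str.endswith s ".flac" &&
        !(PySem.Str.startswith s (PySem.Str.slice f none (some (k : Int)))))) =
      decide (ss.foldl (fun limit s => if PySem.Str.endswith s ".flac" then min limit (pvCpl f s) else limit) L0 < k) := by
  induction ss with
  | nil =>
    intro L0 hL
    simp
    omega
  | cons s t ih =>
    intro L0 hL
    rw [List.any_cons, List.foldl_cons]
    rw [pvStartswith_take]
    by_cases hE : PySem.Str.endswith s ".flac" = true
    · rw [if_pos hE, hE]
      simp only [Bool.true_and]
      by_cases hc : pvCplR f.toList s.toList < k
      · have hsw : (f.toList.take k).isPrefixOf s.toList = false := by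
          rw [Bool.eq_false_iff]
          intro hcon
          have := (pvPrefix_iff_cpl f.toList s.toList k hk).mp hcon
          omega
        rw [hsw]
        simp only [Bool.not_false, Bool.true_or]
        have hminlt : min L0 (pvCpl f s) < k := by rw [pvCpl_eq]; omega
        have hlt := lt_of_le_of_lt (pvFoldl_le f t (min L0 (pvCpl f s))) hminlt
        exact (decide_eq_true hlt).symm
      · have hsw : (f.toList.take k).isPrefixOf s.toList = true :=
          (pvPrefix_iff_cpl f.toList s.toList k hk).mpr (by omega)
        rw [hsw]
        simp only [Bool.not_true, Bool.false_or]
        exact ih _ (by rw [pvCpl_eq]; exact le_min hL (by omega))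
    · rw [if_neg hE]
      simp only [Bool.not_eq_true] at hE
      rw [hE]
      simp only [Bool.false_and, Bool.false_or]
      exact ih _ hL

lemma pvSlice_zero (f : String) (b : Option Int) :
    PySem.Str.slice f (some 0) b = PySem.Str.slice f none b := by
  simp [PySem.Str.slice]

lemma pvSlice_zero_empty (f : String) : PySem.Str.slice f none (some (0 : Int)) = "" := by
  simp [PySem.Str.slice, PySem.List.slice_to]

lemma pvDELIM_toList : pvDELIM.toList = pvD := by decide

lemma pvFindFrom_bridge (f : String) (j : Nat) (hj : j ≤ f.toList.length) :
    PySem.Str.findFrom f pvDELIM ((j : Nat) : Int) none =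
      if PySem.Chars.find (f.toList.drop j) pvD = -1 then -1
      else (j : Int) + PySem.Chars.find (f.toList.drop j) pvD := by
  rw [PySem.Str.findFrom, pvDELIM_toList]
  exact PySem.Chars.findFrom_natCast f.toList pvD j hj

lemma pvBStop1 (f : String) (limit fuel j : Nat) (hj : j ≤ f.toList.length)
    (hfind : PySem.Chars.find (f.toList.drop j) pvD = -1) :
    pvBLoop f limit (fuel + 1) j = j := by
  rw [pvBLoop]
  simp only [pvFindFrom_bridge f j hj, if_pos hfind]
  simp

lemma pvBStop2 (f : String) (limit fuel j : Nat) (hj : j ≤ f.toList.length)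
    (hfind : ¬ PySem.Chars.find (f.toList.drop j) pvD = -1)
    (hL : limit < j + (PySem.Chars.find (f.toList.drop j) pvD).toNat + 3) :
    pvBLoop f limit (fuel + 1) j = j := by
  have h0 : 0 ≤ PySem.Chars.find (f.toList.drop j) pvD := by
    have := PySem.Chars.neg_one_le_find (f.toList.drop j) pvD; omega
  rw [pvBLoop]
  simp only [pvFindFrom_bridge f j hj, if_neg hfind]
  rw [if_neg (by rintro ⟨-, h2⟩; omega)]

lemma pvBStep (f : String) (limit fuel j : Nat) (hj : j ≤ f.toList.length)
    (hfind : ¬ PySem.Chars.find (f.toList.drop j) pvD = -1)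
    (hL : j + (PySem.Chars.find (f.toList.drop j) pvD).toNat + 3 ≤ limit) :
    pvBLoop f limit (fuel + 1) j =
      pvBLoop f limit fuel (j + (PySem.Chars.find (f.toList.drop j) pvD).toNat + 3) := by
  have h0 : 0 ≤ PySem.Chars.find (f.toList.drop j) pvD := by
    have := PySem.Chars.neg_one_le_find (f.toList.drop j) pvD; omega
  rw [pvBLoop]
  simp only [pvFindFrom_bridge f j hj, if_neg hfind]
  rw [if_pos ⟨by omega, by omega⟩]
  congr 1
  omega

lemma pvMain (strings : List String) (f : String) :
    ∀ (fuel j : Nat) (c : String), j ≤ f.toList.length → f.toList.length - j < fuel →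
      pvALoop strings f (pvCountR (f.toList.drop j)) ((j : Nat) : Int) c (PySem.Str.slice f none (some ((j : Nat) : Int)))
        = PySem.Str.slice f none (some ((pvBLoop f (pvLimit strings f) fuel j : Nat) : Int)) := by
  intro fuel
  induction fuel with
  | zero => intro j c hj hf; omega
  | succ fuel ih =>
    intro j c hj hf
    by_cases hfind : PySem.Chars.find (f.toList.drop j) pvD = -1
    · have hc0 : pvCountR (f.toList.drop j) = 0 := by
        rw [pvCountR_step, if_pos hfind]
      rw [hc0, pvALoop, pvBStop1 f _ fuel j hj hfind]
    · have h0 : 0 ≤ PySem.Chars.find (f.toList.drop j) pvD := by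
        have := PySem.Chars.neg_one_le_find (f.toList.drop j) pvD; omega
      have hfits := pvFind_fits _ hfind
      rw [List.length_drop] at hfits
      set i := (PySem.Chars.find (f.toList.drop j) pvD).toNat with hi
      have hj' : j + i + 3 ≤ f.toList.length := by omega
      have hcount : pvCountR (f.toList.drop j) = pvCountR (f.toList.drop (j + i + 3)) + 1 := by
        rw [pvCountR_step, if_neg hfind, List.drop_drop]
        congr 2
      rw [hcount, pvALoop]
      have hskip : PySem.Str.findFrom f pvDELIM ((j : Nat) : Int) none + (PySem.Str.len pvDELIM)
          = (((j + i + 3 : Nat) : Nat) : Int) := by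
        rw [pvFindFrom_bridge f j hj, if_neg hfind]
        have h3 : PySem.Str.len pvDELIM = 3 := by decide
        rw [h3]
        push_cast [hi]
        omega
      rw [hskip, pvSlice_zero]
      rw [pvAnyIff f (j + i + 3) hj' strings f.toList.length hj']
      by_cases hL : pvLimit strings f < j + i + 3
      · rw [if_pos (by unfold pvLimit at hL; exact decide_eq_true hL)]
        rw [pvBStop2 f _ fuel j hj hfind (by rw [← hi]; omega)]
      · rw [if_neg (by unfold pvLimit at hL; simpa using hL)]
        rw [pvBStep f _ fuel j hj hfind (by rw [← hi]; omega)]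
        exact ih (j + i + 3) _ hj' (by omega)

-- ===== VERDICT (by name: the statement is the Claim_ definition above) =====
theorem bandcamp_prefix_spec : Claim_equal_bandcamp_prefix := by
  intro strings _dom hpre
  unfold Spec_bandcamp_prefix
  cases strings with
  | nil => exact absurd rfl hpre
  | cons s t =>
    rw [bandcamp_prefix, bandcamp_prefix_alt]
    have hget : PySem.List.pyGet? (s :: t) 0 = some s := by
      simp [PySem.List.pyGet?, PySem.List.pyIdx?]
    rw [hget]
    simp only []
    have hcount : PySem.Str.count s pvDELIM = pvCountR (s.toList.drop 0) := by
      rw [PySem.Str.count, pvDELIM_toList, pvCount_eq]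
      simp
    rw [hcount]
    have h0 : (0 : Int) = ((0 : Nat) : Int) := rfl
    rw [h0, ← pvSlice_zero_empty s]
    exact pvMain (s :: t) s (s.toList.length + 1) 0 "" (by omega) (by omega)
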